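-- pv_equiv track=rewrite | github.com/ipanin/adventOfCode2020 | day14/2.py | fill_x
-- ===== SOURCE A (Python) =====
-- def fill_x(mask: str, val: int) -> int:
--     result = 0
--     pos = 1
--     for c in reversed(mask):
--         if c == 'X':
--             bit = val%2
--             val = val // 2
--         elif c == '0':
--             bit = 0
--         elif c == '1':
--             bit = 1
--         result += bit * pos
--         pos *= 2
--     return result
-- ===== SOURCE B (Python) =====
-- def fill_x(mask: str, val: int) -> int:
--     base = int(mask.replace('X', '0') or '0', 2)
--     x_positions = [i for i, c in enumerate(reversed(mask)) if c == 'X']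
--     for pos in x_positions:
--         base += (val & 1) << pos
--         val >>= 1
--     return base
-- ===== Notes on version B (the rewrite author's own statement) =====
-- stated objective: alternative
-- what changed: A's single interleaved right-to-left loop (tracking result, pos and the consumed val bits together) is replaced by computing the fixed bits once via int(mask.replace('X','0') or '0', 2), building a table of X bit-positions, and a separate pass scattering val's bits into those positions.
-- outside the precondition, e.g. on fill_x('a1', 0): A returns 3, B raises ValueError; on fill_x('bXb1', 178): A returns 3, B raises ValueError
import Mathlib
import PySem

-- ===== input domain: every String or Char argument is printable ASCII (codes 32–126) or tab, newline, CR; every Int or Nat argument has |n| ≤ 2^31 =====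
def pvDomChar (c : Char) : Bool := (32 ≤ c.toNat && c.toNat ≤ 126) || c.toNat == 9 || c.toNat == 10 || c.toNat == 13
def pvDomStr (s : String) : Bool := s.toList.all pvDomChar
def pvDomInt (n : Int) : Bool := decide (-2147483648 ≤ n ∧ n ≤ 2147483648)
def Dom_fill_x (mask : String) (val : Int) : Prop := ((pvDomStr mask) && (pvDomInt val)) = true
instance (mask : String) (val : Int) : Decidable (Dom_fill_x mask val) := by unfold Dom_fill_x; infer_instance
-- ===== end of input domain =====

-- B replaces A's single interleaved right-to-left loop by a fixed-bits parse (int(mask with X→0, 2))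
-- plus an X-position table and a separate scatter pass of val's bits (objective: alternative decomposition).

-- ===== PORT A =====
-- state = (result, pos, val, bit); 'bit' starts at 0 only to make the fold total: on masks whose
-- rightmost char is outside {0,1,X} Python raises UnboundLocalError (such masks are outside Pre_).
def fillxStep (st : Int × Int × Int × Int) (c : Char) : Int × Int × Int × Int :=
  let bv : Int × Int :=
    if c = 'X' then (PySem.Int.mod st.2.2.1 2, PySem.Int.floordiv st.2.2.1 2)
    else if c = '0' then (0, st.2.2.1)
    else if c = '1' then (1, st.2.2.1)
    else (st.2.2.2, st.2.2.1)
  (st.1 + bv.1 * st.2.1, st.2.1 * 2, bv.2, bv.1)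

def fill_x (mask : String) (val : Int) : Int :=
  (mask.toList.reverse.foldl fillxStep (0, 1, val, 0)).1

-- ===== PORT B =====
-- ports int(s, 2) exactly for the '0'/'1'-digit strings produced under Pre_ (empty string gives 0,
-- matching the `or '0'` guard); on other strings Python raises ValueError, excluded by Pre_.
def pyIntBase2 (cs : List Char) : Int :=
  cs.foldl (fun a c => a * 2 + (if c = '1' then 1 else 0)) 0

-- state = (base, val); `val & 1` = PySem.Int.band, `val >>= 1` = Int's arithmetic shift (Python-exact)
def scatStep (st : Int × Int) (p : Int) : Int × Int :=
  (st.1 + (PySem.Int.band st.2 1) <<< p.toNat, st.2 >>> (1:Nat))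

def fill_x_alt (mask : String) (val : Int) : Int :=
  let base := pyIntBase2 (mask.toList.map (fun c => if c = 'X' then '0' else c))
  let xpos := ((PySem.List.enumerate mask.toList.reverse 0).filter (fun p => p.2 = 'X')).map (fun p => p.1)
  (xpos.foldl scatStep (base, val)).1

-- ===== PRECONDITION & SPEC =====
-- Pre_ excludes masks with a character outside {'0','1','X'}: there Python A either raises
-- UnboundLocalError (invalid rightmost char) or returns a stale-bit value that is an accident of its
-- loop, while B's int(...,2) raises ValueError on every such mask.
def Pre_fill_x (mask : String) (val : Int) : Prop :=
  mask.toList.all (fun c => c == '0' || c == '1' || c == 'X') = true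
instance (mask : String) (val : Int) : Decidable (Pre_fill_x mask val) := by
  unfold Pre_fill_x; infer_instance

def pvWitness_fill_x : String × Int := ("X1X0", 5)

def Spec_fill_x (mask : String) (val : Int) (out : Int) : Prop := out = fill_x_alt mask val
instance (mask : String) (val : Int) (out : Int) : Decidable (Spec_fill_x mask val out) := by
  unfold Spec_fill_x; infer_instance

-- ===== CLAIM (what is proved, stated in full; the proofs are below) =====
def Claim_equal_fill_x : Prop := ∀ (mask : String) (val : Int), Dom_fill_x mask val → Pre_fill_x mask val → Spec_fill_x mask val (fill_x mask val)

-- ===== LEMMAS AND PROOFS =====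

-- LSB-first value of the whole computation (proof-only characterisation)
def specA : List Char → Int → Int
  | [], _ => 0
  | c :: cs, v =>
    if c = 'X' then PySem.Int.mod v 2 + 2 * specA cs (PySem.Int.floordiv v 2)
    else (if c = '1' then (1 : Int) else 0) + 2 * specA cs v

-- LSB-first fixed-bit part
def parseL : List Char → Int
  | [] => 0
  | c :: cs => (if c = '1' then (1 : Int) else 0) + 2 * parseL cs

-- LSB-first scattered part
def scatL : List Char → Int → Int
  | [], _ => 0
  | c :: cs, v =>
    if c = 'X' then PySem.Int.band v 1 + 2 * scatL cs (v >>> (1:Nat)) else 2 * scatL cs v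

theorem A_fold (l : List Char) : ∀ (r p v b : Int),
    (∀ c ∈ l, c = '0' ∨ c = '1' ∨ c = 'X') →
    (l.foldl fillxStep (r, p, v, b)).1 = r + p * specA l v := by
  induction l with
  | nil => intro r p v b _; simp [specA]
  | cons c cs ih =>
    intro r p v b hv
    have hc := hv c (List.mem_cons_self)
    have hcs : ∀ c ∈ cs, c = '0' ∨ c = '1' ∨ c = 'X' :=
      fun x hx => hv x (List.mem_cons_of_mem _ hx)
    rcases hc with h | h | h <;> subst h <;>
      simp [List.foldl_cons, fillxStep, specA, ih _ _ _ _ hcs] <;> ring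

theorem parseL_append (xs : List Char) (c : Char) :
    parseL (xs ++ [c]) = parseL xs + (if c = '1' then 1 else 0) * 2 ^ xs.length := by
  induction xs with
  | nil => simp [parseL]
  | cons x xs ih => simp [parseL, ih, pow_succ]; split_ifs <;> ring

theorem foldl_parse (l : List Char) : ∀ (a : Int),
    l.foldl (fun a c => a * 2 + (if c = '1' then 1 else 0)) a
      = a * 2 ^ l.length + parseL l.reverse := by
  induction l with
  | nil => intro a; simp [parseL]
  | cons c cs ih =>
    intro a
    simp only [List.foldl_cons, ih, List.reverse_cons, parseL_append, List.length_reverse,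
      List.length_cons, pow_succ]
    ring

theorem digit_eq (c : Char) :
    (if (if c = 'X' then '0' else c) = '1' then (1 : Int) else 0)
      = (if c = '1' then (1 : Int) else 0) := by
  by_cases h : c = 'X' <;> simp [h]

theorem scat_fold (l : List Char) : ∀ (s : Nat) (b v : Int),
    ((((PySem.List.enumerate l (s : Int)).filter (fun p => p.2 = 'X')).map (fun p => p.1)).foldl
        scatStep (b, v)).1
      = b + 2 ^ s * scatL l v := by
  induction l with
  | nil => intro s b v; simp [PySem.List.enumerate, scatL]
  | cons c cs ih =>
    intro s b v
    have hs : (s : Int) + 1 = ((s + 1 : Nat) : Int) := by push_cast; ring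
    rw [PySem.List.enumerate_cons, hs]
    by_cases hc : c = 'X'
    · subst hc
      simp only [List.filter_cons, decide_eq_true_eq, List.map_cons,
        List.foldl_cons, scatStep, scatL, reduceIte, ih (s + 1)]
      rw [Int.shiftLeft_eq, Int.toNat_natCast]
      push_cast [pow_succ]
      ring
    · simp only [List.filter_cons, decide_eq_true_eq, scatL, hc, if_neg hc, if_false, ih (s + 1)]
      push_cast [pow_succ]
      ring

theorem shiftRight_one_eq_floordiv (v : Int) : v >>> (1:Nat) = PySem.Int.floordiv v 2 := by
  rw [Int.shiftRight_eq_div_pow, PySem.Int.floordiv_eq_ediv_of_pos (by norm_num)]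
  norm_num

theorem spec_split (l : List Char) : ∀ (v : Int),
    (∀ c ∈ l, c = '0' ∨ c = '1' ∨ c = 'X') →
    specA l v = parseL l + scatL l v := by
  induction l with
  | nil => intro v _; simp [specA, parseL, scatL]
  | cons c cs ih =>
    intro v hv
    have hc := hv c (List.mem_cons_self)
    have hcs : ∀ c ∈ cs, c = '0' ∨ c = '1' ∨ c = 'X' :=
      fun x hx => hv x (List.mem_cons_of_mem _ hx)
    rcases hc with h | h | h <;> subst h <;>
      simp [specA, parseL, scatL, ih _ hcs, PySem.Int.band_one,
        shiftRight_one_eq_floordiv] <;> ring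

-- ===== VERDICT (by name: the statement is the Claim_ definition above) =====
theorem fill_x_spec : Claim_equal_fill_x := by
  intro mask val _ hpre
  unfold Spec_fill_x
  have hrev : ∀ c ∈ mask.toList.reverse, c = '0' ∨ c = '1' ∨ c = 'X' := by
    intro c hc
    have := List.all_eq_true.mp hpre c (List.mem_reverse.mp hc)
    have h2 : (c = '0' ∨ c = '1') ∨ c = 'X' := by simpa using this
    tauto
  have hA : fill_x mask val = specA mask.toList.reverse val := by
    unfold fill_x
    rw [A_fold _ _ _ _ _ hrev]; ring
  have hbase : pyIntBase2 (mask.toList.map (fun c => if c = 'X' then '0' else c))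
      = parseL mask.toList.reverse := by
    unfold pyIntBase2
    rw [List.foldl_map]
    simp only [digit_eq]
    rw [foldl_parse]
    ring
  have hB : fill_x_alt mask val = parseL mask.toList.reverse + scatL mask.toList.reverse val := by
    unfold fill_x_alt
    simp only [hbase]
    have := scat_fold mask.toList.reverse 0 (parseL mask.toList.reverse) val
    simpa using this
  rw [hA, hB, spec_split _ _ hrev]
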